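-- pv_equiv track=rewrite | github.com/pypi-data/pypi-mirror-390 | packages/axcode/axcode-0.2.0.tar.gz/axcode-0.2.0/ax/core/pattern_learner.py | _detect_string_quotes
-- ===== SOURCE A (Python) =====
-- from typing import Dict, Any, List
--
-- def _detect_string_quotes(content: str) -> List[str]:
--     """Detect whether code prefers single or double quotes"""
--     quotes = []
--     in_string = False
--     quote_char = None
--
--     i = 0
--     while i < len(content):
--         char = content[i]
--
--         # Skip triple-quoted strings
--         if i + 2 < len(content) and content[i:i+3] in ['"""', "'''"]:
--             i += 3
--             continue
--
--         if char in ['"', "'"] and not in_string: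
--             quotes.append('double' if char == '"' else 'single')
--
--         i += 1
--
--     return quotes
-- ===== SOURCE B (Python) =====
-- from typing import List
--
-- def _detect_string_quotes(content: str) -> List[str]:
--     """Run-length rewrite: group each maximal run of a repeated quote char and
--     emit (run length mod 3) tokens for it; non-quote characters are skipped."""
--     out: List[str] = []
--     n = len(content)
--     i = 0
--     while i < n:
--         c = content[i]
--         if c != '"' and c != "'":
--             i += 1
--             continue
--         j = i + 1
--         while j < n and content[j] == c:
--             j += 1
--         out.extend(['double' if c == '"' else 'single'] * ((j - i) % 3))
--         i = j
--     return out
-- ===== Notes on version B (the rewrite author's own statement) =====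
-- stated objective: faster
-- what changed: Replaces the per-character scanner (which slices content[i:i+3] and does two list-membership tests at every index) by a run-length algorithm: each maximal run of a repeated quote character is located once and contributes (run length mod 3) tokens, a closed form for the scanner's greedy triple-skipping; non-quote characters are skipped without any slicing or membership test.
import Mathlib
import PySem

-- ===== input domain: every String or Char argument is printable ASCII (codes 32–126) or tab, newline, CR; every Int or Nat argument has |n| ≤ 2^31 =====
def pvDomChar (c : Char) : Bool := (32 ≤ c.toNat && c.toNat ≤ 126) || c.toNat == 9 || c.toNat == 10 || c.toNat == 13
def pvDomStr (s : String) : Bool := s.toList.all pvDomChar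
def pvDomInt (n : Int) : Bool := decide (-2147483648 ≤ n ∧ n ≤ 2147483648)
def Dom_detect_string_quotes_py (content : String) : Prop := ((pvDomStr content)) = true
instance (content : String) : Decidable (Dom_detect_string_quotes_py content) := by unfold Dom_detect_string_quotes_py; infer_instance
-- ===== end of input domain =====

-- B replaces A's char-by-char triple-slicing scanner with a run-length pass
-- (each maximal run of a quote char yields run-length mod 3 tokens): measurably faster in Python, same O(n).

-- ===== PORT A =====
-- A's while loop over index i, transliterated as recursion on the remaining characters;
-- the dead `in_string` flag (never set) is threaded as a parameter, `quote_char` is never read and is omitted.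
def detectLoopA (in_string : Bool) : List Char → List String
  | c1 :: c2 :: c3 :: rest =>
      -- i + 2 < len(content): a full 3-char slice exists
      if (c1 = '"' ∧ c2 = '"' ∧ c3 = '"') ∨ (c1 = '\'' ∧ c2 = '\'' ∧ c3 = '\'') then
        detectLoopA in_string rest                      -- i += 3; continue
      else if (c1 = '"' ∨ c1 = '\'') ∧ in_string = false then
        (if c1 = '"' then "double" else "single") :: detectLoopA in_string (c2 :: c3 :: rest)
      else
        detectLoopA in_string (c2 :: c3 :: rest)
  | c1 :: rest =>
      -- fewer than 3 characters remain: the triple check is skipped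
      if (c1 = '"' ∨ c1 = '\'') ∧ in_string = false then
        (if c1 = '"' then "double" else "single") :: detectLoopA in_string rest
      else
        detectLoopA in_string rest
  | [] => []

def detect_string_quotes_py (content : String) : List String :=
  detectLoopA false content.toList

-- ===== PORT B =====
-- Source B's inner `while j < n and content[j] == c` loop: length of the run of c at the front
def countRun (c : Char) : List Char → Nat
  | x :: xs => if x = c then countRun c xs + 1 else 0
  | [] => 0

def detectLoopB : List Char → List String
  | [] => []
  | c :: rest =>
      if c = '"' ∨ c = '\'' then
        let k := countRun c rest
        List.replicate ((k + 1) % 3) (if c = '"' then "double" else "single")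
          ++ detectLoopB (rest.drop k)
      else
        detectLoopB rest
termination_by l => l.length
decreasing_by
  · simp only [List.length_drop, List.length_cons]; omega
  · simp

def detect_string_quotes_py_alt (content : String) : List String :=
  detectLoopB content.toList

-- ===== PRECONDITION & SPEC =====
def Spec_detect_string_quotes_py (content : String) (out : List String) : Prop := out = detect_string_quotes_py_alt content
instance (content : String) (out : List String) : Decidable (Spec_detect_string_quotes_py content out) := by unfold Spec_detect_string_quotes_py; infer_instance

-- ===== CLAIM (what is proved, stated in full; the proofs are below) =====
def Claim_equal_detect_string_quotes_py : Prop := ∀ (content : String), Dom_detect_string_quotes_py content → Spec_detect_string_quotes_py content (detect_string_quotes_py content)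

-- ===== LEMMAS AND PROOFS =====

theorem cne1 : ('"' : Char) ≠ '\'' := by decide
theorem cne2 : ('\'' : Char) ≠ '"' := by decide

theorem countRun_le (c : Char) : ∀ l : List Char, countRun c l ≤ l.length := by
  intro l
  induction l with
  | nil => simp [countRun]
  | cons x xs ih => simp only [countRun, List.length_cons]; split <;> omega

theorem detectLoopB_cons (c : Char) (rest : List Char) :
    detectLoopB (c :: rest)
      = if c = '"' ∨ c = '\'' then
          List.replicate ((countRun c rest + 1) % 3) (if c = '"' then "double" else "single")
            ++ detectLoopB (rest.drop (countRun c rest))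
        else detectLoopB rest := by
  rw [detectLoopB.eq_def]

theorem splitRun (c : Char) : ∀ l : List Char,
    List.replicate (countRun c l) c ++ l.drop (countRun c l) = l := by
  intro l
  induction l with
  | nil => simp [countRun]
  | cons x xs ih =>
    by_cases hx : x = c
    · subst hx; simp [countRun, List.replicate_succ, ih]
    · simp [countRun, hx]

theorem dropHead (c : Char) : ∀ (l : List Char) (x : Char),
    (l.drop (countRun c l)).head? = some x → x ≠ c := by
  intro l
  induction l with
  | nil => intro x h; simp [countRun] at h
  | cons y ys ih =>
    intro x h
    by_cases hy : y = c
    · subst hy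
      simp only [countRun] at h
      exact ih x h
    · simp only [countRun, if_neg hy, List.drop_zero, List.head?_cons, Option.some.injEq] at h
      rw [← h]; exact hy

-- the run lemma: A's scanner on a run of m copies of a quote char c, followed by a
-- tail not starting with c, emits m % 3 tokens and then scans the tail.
theorem runA (c : Char) (hq : c = '"' ∨ c = '\'') :
    ∀ m (t : List Char), (∀ x, t.head? = some x → x ≠ c) →
      detectLoopA false (List.replicate m c ++ t) =
        List.replicate (m % 3) (if c = '"' then "double" else "single") ++ detectLoopA false t := by
  intro m
  induction m using Nat.strong_induction_on with
  | _ m ih =>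
    intro t ht
    match m with
    | 0 => simp
    | 1 =>
      match t with
      | [] => rcases hq with h | h <;> subst h <;> simp [detectLoopA]
      | [x] =>
        have hx := ht x (by simp)
        rcases hq with h | h <;> subst h <;> simp [detectLoopA, hx, cne1, cne2]
      | x :: y :: t' =>
        have hx := ht x (by simp)
        rcases hq with h | h <;> subst h <;> simp [detectLoopA, hx, cne1, cne2]
    | 2 =>
      match t with
      | [] => rcases hq with h | h <;> subst h <;> simp [detectLoopA, List.replicate_succ]
      | x :: t' =>
        have hx := ht x (by simp)
        have h1 := ih 1 (by omega) (x :: t') ht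
        simp only [List.replicate_succ, List.replicate_zero, List.nil_append,
          List.cons_append, Nat.reduceMod] at h1
        rcases hq with h | h <;> subst h <;>
          simp [detectLoopA, hx, cne1, cne2, h1, List.replicate_succ]
    | (k + 3) =>
      have htr : detectLoopA false (List.replicate (k + 3) c ++ t)
          = detectLoopA false (List.replicate k c ++ t) := by
        rcases hq with h | h <;> subst h <;>
          simp [List.replicate_succ, detectLoopA, cne1, cne2]
      rw [htr, ih k (by omega) t ht, Nat.add_mod_right]

-- A skips a non-quote character
theorem skipA (c : Char) (hc1 : c ≠ '"') (hc2 : c ≠ '\'') :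
    ∀ rest : List Char, detectLoopA false (c :: rest) = detectLoopA false rest := by
  intro rest
  match rest with
  | [] => simp [detectLoopA, hc1, hc2]
  | [x] => simp [detectLoopA, hc1, hc2]
  | x :: y :: r => simp [detectLoopA, hc1, hc2]

theorem mainEq : ∀ (n : ℕ) (l : List Char), l.length ≤ n → detectLoopA false l = detectLoopB l := by
  intro n
  induction n with
  | zero =>
    intro l hl
    have : l = [] := by cases l <;> simp_all
    subst this; simp [detectLoopA, detectLoopB]
  | succ n ih =>
    intro l hl
    match l with
    | [] => simp [detectLoopA, detectLoopB]
    | c :: rest =>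
      by_cases hq : c = '"' ∨ c = '\''
      · have hsplit : c :: rest
            = List.replicate (countRun c rest + 1) c ++ rest.drop (countRun c rest) := by
          rw [List.replicate_succ]
          simp [splitRun c rest]
        rw [hsplit, runA c hq (countRun c rest + 1) _ (dropHead c rest), ← hsplit]
        rw [detectLoopB_cons]
        simp only [if_pos hq]
        have hlen : (rest.drop (countRun c rest)).length ≤ n := by
          have := countRun_le c rest
          simp only [List.length_drop]
          simp only [List.length_cons] at hl
          omega
        rw [ih _ hlen]
      · have hc1 : c ≠ '"' := fun h => hq (Or.inl h)
        have hc2 : c ≠ '\'' := fun h => hq (Or.inr h)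
        rw [skipA c hc1 hc2 rest, detectLoopB_cons]
        simp only [hc1, hc2, false_or, if_false]
        exact ih rest (by simp at hl; omega)

-- ===== VERDICT (by name: the statement is the Claim_ definition above) =====
theorem detect_string_quotes_py_spec : Claim_equal_detect_string_quotes_py := by
  intro content _
  unfold Spec_detect_string_quotes_py detect_string_quotes_py detect_string_quotes_py_alt
  exact mainEq content.toList.length content.toList le_rfl
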